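-- pv_equiv track=rewrite | github.com/XXG314/fac | p8 3.py | fac2
-- ===== SOURCE A (Python) =====
-- def fac2(m, n):
--     z=n-m
--     t=z//3
--     z=z%3
--     m+=2
--     k=m*m
--     j=27*m
--     g=(j<<1)+162
--     j+=9*k+24
--     k=k*m-m
--     if z==1:
--         m=n
--     else:
--         m=1
--         if z==2:
--             m=n*(n-1)
--     t=g+t*162
--     while g!=t:
--         m*=k
--         k+=j
--         j+=g
--         g+=162
--     return m
-- ===== SOURCE B (Python) =====
-- def fac2(m, n):
--     # product of the consecutive integers m+1, m+2, ..., n via a balanced product tree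
--     return _prod_range(m + 1, n + 1)
--
-- def _prod_range(lo, hi):
--     # product of the integers in [lo, hi); empty product is 1
--     if hi - lo <= 0:
--         return 1
--     if hi - lo == 1:
--         return lo
--     mid = (lo + hi) // 2
--     return _prod_range(lo, mid) * _prod_range(mid, hi)
-- ===== Notes on version B (the rewrite author's own statement) =====
-- stated objective: alternative
-- what changed: Replaced the hand-rolled finite-difference while loop (one multiply per 3 factors, left-to-right accumulation) by a recursive balanced product tree (binary splitting) over the same factor range m+1..n.
import Mathlib
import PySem

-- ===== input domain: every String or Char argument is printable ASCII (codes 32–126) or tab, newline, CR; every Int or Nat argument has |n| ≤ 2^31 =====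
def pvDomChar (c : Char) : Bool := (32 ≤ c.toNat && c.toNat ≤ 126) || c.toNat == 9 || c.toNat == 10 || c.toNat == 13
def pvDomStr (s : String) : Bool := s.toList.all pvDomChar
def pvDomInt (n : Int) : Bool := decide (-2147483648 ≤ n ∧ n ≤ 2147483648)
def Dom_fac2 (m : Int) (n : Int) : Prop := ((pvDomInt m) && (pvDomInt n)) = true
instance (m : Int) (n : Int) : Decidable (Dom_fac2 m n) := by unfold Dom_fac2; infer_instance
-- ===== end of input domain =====

-- B replaces A's finite-difference while loop by a balanced product tree over the same factors m+1..n.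

-- ===== PORT A =====
-- A's while loop, one step per iteration; the `g < t` test is only a totality
-- guard: when g > t (i.e. n < m, excluded by Pre_) the Python loop never terminates.
def fac2Loop (t m k j g : Int) : Int :=
  if g ≠ t then
    if h : g < t then fac2Loop t (m * k) (k + j) (j + g) (g + 162)
    else m
  else m
termination_by (t - g).toNat
decreasing_by omega

def fac2 (m : Int) (n : Int) : Int :=
  let z := n - m
  let t := PySem.Int.floordiv z 3
  let z := PySem.Int.mod z 3
  let m' := m + 2
  let k := m' * m'
  let j := 27 * m'
  let g := j * 2 + 162          -- j << 1 is j * 2 (exact for all Python ints)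
  let j := j + 9 * k + 24
  let k := k * m' - m'
  let acc := if z = 1 then n else if z = 2 then n * (n - 1) else 1
  let t := g + t * 162
  fac2Loop t acc k j g

-- ===== PORT B =====
-- product of the integers in [lo, hi); empty product is 1
def prodRangeAlt (lo hi : Int) : Int :=
  if hi - lo ≤ 0 then 1
  else if hi - lo = 1 then lo
  else
    let mid := PySem.Int.floordiv (lo + hi) 2
    prodRangeAlt lo mid * prodRangeAlt mid hi
termination_by (hi - lo).toNat
decreasing_by
  all_goals simp only [PySem.Int.floordiv_eq_ediv_of_pos (a := lo + hi) (by norm_num : (0:Int) < 2)] at *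
  all_goals omega

def fac2_alt (m : Int) (n : Int) : Int := prodRangeAlt (m + 1) (n + 1)

-- ===== PRECONDITION & SPEC =====
-- Pre_ excludes n < m, where A's while loop never terminates (g passes t and grows forever).
def Pre_fac2 (m : Int) (n : Int) : Prop := m ≤ n
instance (m : Int) (n : Int) : Decidable (Pre_fac2 m n) := by unfold Pre_fac2; infer_instance
def pvWitness_fac2 : Int × Int := (2, 9)

def Spec_fac2 (m : Int) (n : Int) (out : Int) : Prop := out = fac2_alt m n
instance (m : Int) (n : Int) (out : Int) : Decidable (Spec_fac2 m n out) := by unfold Spec_fac2; infer_instance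

-- ===== CLAIM (what is proved, stated in full; the proofs are below) =====
def Claim_equal_fac2 : Prop := ∀ (m : Int) (n : Int), Dom_fac2 m n → Pre_fac2 m n → Spec_fac2 m n (fac2 m n)

-- ===== LEMMAS AND PROOFS =====

-- common specification: product lo * (lo+1) * ... * (lo+len-1)
def intProd (lo : Int) : Nat → Int
  | 0 => 1
  | k + 1 => intProd lo k * (lo + k)

lemma intProd_add (lo : Int) (a b : Nat) :
    intProd lo (a + b) = intProd lo a * intProd (lo + a) b := by
  induction b with
  | zero => simp [intProd]
  | succ b ih =>
    show intProd lo (a + b + 1) = _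
    simp only [intProd, ih]
    push_cast
    ring

-- the cubic A's finite differences track, and its first/second differences
def cubK (b i : Int) : Int := (b + 3*i + 1) * (b + 3*i + 2) * (b + 3*i + 3)
def cubJ (b i : Int) : Int := cubK b (i + 1) - cubK b i
def cubG (b i : Int) : Int := cubJ b (i + 1) - cubJ b i

lemma fac2Loop_spec (b : Int) (q : Nat) :
    ∀ (i acc : Int),
      fac2Loop (cubG b i + 162 * q) acc (cubK b i) (cubJ b i) (cubG b i)
        = acc * intProd (b + 3*i + 1) (3 * q) := by
  induction q with
  | zero =>
    intro i acc
    rw [fac2Loop]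
    simp [intProd]
  | succ q ih =>
    intro i acc
    rw [fac2Loop]
    have hne : cubG b i ≠ cubG b i + 162 * (((q : Nat) + 1 : Nat) : Int) := by push_cast; omega
    have hlt : cubG b i < cubG b i + 162 * (((q : Nat) + 1 : Nat) : Int) := by push_cast; omega
    have hK : cubK b i + cubJ b i = cubK b (i + 1) := by simp [cubJ]
    have hJ : cubJ b i + cubG b i = cubJ b (i + 1) := by simp [cubG]
    have hG : cubG b i + 162 = cubG b (i + 1) := by
      simp only [cubG, cubJ, cubK]; ring
    have ht : cubG b i + 162 * (((q : Nat) + 1 : Nat) : Int) = cubG b (i + 1) + 162 * (q : Nat) := by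
      push_cast; omega
    rw [if_pos hne, dif_pos hlt, hK, hJ, hG, ht, ih (i + 1) (acc * cubK b i)]
    have hsplit : 3 * (q + 1) = 3 + 3 * q := by omega
    rw [hsplit, intProd_add]
    have hlo : b + 3 * (i + 1) + 1 = b + 3 * i + 1 + ((3 : Nat) : Int) := by push_cast; ring
    rw [hlo]
    simp only [intProd, cubK]
    push_cast
    ring

lemma prodRangeAlt_eq (lo hi : Int) : prodRangeAlt lo hi = intProd lo (hi - lo).toNat := by
  generalize hN : (hi - lo).toNat = N
  induction N using Nat.strong_induction_on generalizing lo hi with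
  | _ N ih =>
    rw [prodRangeAlt]
    by_cases h0 : hi - lo ≤ 0
    · have : N = 0 := by omega
      simp [h0, this, intProd]
    · by_cases h1 : hi - lo = 1
      · have : N = 1 := by omega
        simp [h1, this, intProd]
      · have h2 : 2 ≤ hi - lo := by omega
        rw [if_neg h0, if_neg h1]
        have hmid : PySem.Int.floordiv (lo + hi) 2 = (lo + hi) / 2 :=
          PySem.Int.floordiv_eq_ediv_of_pos (by norm_num)
        show prodRangeAlt lo (PySem.Int.floordiv (lo + hi) 2) *
              prodRangeAlt (PySem.Int.floordiv (lo + hi) 2) hi = intProd lo N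
        rw [hmid]
        set mid := (lo + hi) / 2 with hm
        have hlm : lo < mid := by omega
        have hmh : mid < hi := by omega
        have e1 := ih (mid - lo).toNat (by omega) lo mid rfl
        have e2 := ih (hi - mid).toNat (by omega) mid hi rfl
        rw [e1, e2]
        have hsum : N = (mid - lo).toNat + (hi - mid).toNat := by omega
        rw [hsum, intProd_add]
        congr 2
        omega

theorem fac2_spec : Claim_equal_fac2 := by
  intro m n _ hpre
  unfold Pre_fac2 at hpre
  unfold Spec_fac2 fac2 fac2_alt
  have hd : 0 ≤ n - m := by omega
  have hdiv : PySem.Int.floordiv (n - m) 3 = (n - m) / 3 :=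
    PySem.Int.floordiv_eq_ediv_of_pos (by norm_num)
  have hmod : PySem.Int.mod (n - m) 3 = (n - m) % 3 :=
    PySem.Int.mod_eq_emod_of_pos (by norm_num)
  set q : Nat := ((n - m) / 3).toNat with hq
  have hq' : (n - m) / 3 = (q : Int) := by rw [hq]; omega
  have hKm : (m + 2) * (m + 2) * (m + 2) - (m + 2) = cubK m 0 := by
    simp only [cubK]; ring
  have hJm : 27 * (m + 2) + 9 * ((m + 2) * (m + 2)) + 24 = cubJ m 0 := by
    simp only [cubJ, cubK]; ring
  have hGm : 27 * (m + 2) * 2 + 162 = cubG m 0 := by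
    simp only [cubG, cubJ, cubK]; ring
  simp only [hdiv, hmod, hq']
  rw [hKm, hJm, hGm, show cubG m 0 + (q : Int) * 162 = cubG m 0 + 162 * (q : Int) by ring,
    fac2Loop_spec m q 0, prodRangeAlt_eq,
    show m + 3 * (0 : Int) + 1 = m + 1 by ring]
  have hlen : (n + 1 - (m + 1)).toNat = 3 * q + ((n - m) % 3).toNat := by omega
  rw [hlen]
  have hr : (n - m) % 3 = 0 ∨ (n - m) % 3 = 1 ∨ (n - m) % 3 = 2 := by omega
  rcases hr with h | h | h
  · rw [h]
    norm_num
  · rw [h, show (3 * q + (1 : Int).toNat) = 3 * q + 1 from rfl]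
    norm_num [intProd]
    have hn : m + 1 + ((3 * q : Nat) : Int) = n := by push_cast; omega
    push_cast at hn ⊢
    rw [hn]
    ring
  · rw [h, show (3 * q + (2 : Int).toNat) = 3 * q + 1 + 1 from rfl]
    norm_num [intProd]
    have e1 : m + 1 + ((3 * q : Nat) : Int) = n - 1 := by push_cast; omega
    have e2 : m + 1 + (((3 * q : Nat) : Int) + 1) = n := by push_cast; omega
    push_cast at e1 e2 ⊢
    rw [e1, e2]
    ring
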